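-- pv_equiv track=rewrite | github.com/Prad-v/audit-service | scripts/analyze-changes.py | analyze_change_types
-- ===== SOURCE A (Python) =====
-- from typing import Dict, List, Tuple
--
-- def analyze_change_types(files: List[str]) -> Dict[str, int]:
--     """Analyze what types of changes were made."""
--     change_types = {
--         'backend': 0,
--         'frontend': 0,
--         'infrastructure': 0,
--         'documentation': 0,
--         'tests': 0,
--         'other': 0
--     }
--
--     for file_path in files:
--         if not file_path:
--             continue
--
--         if file_path.startswith('backend/') or file_path.endswith('.py'):
--             change_types['backend'] += 1
--         elif file_path.startswith('frontend/') or file_path.endswith(('.tsx', '.ts', '.jsx', '.js', '.css', '.html')):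
--             change_types['frontend'] += 1
--         elif any(file_path.startswith(prefix) for prefix in ['docker-compose', 'Dockerfile', 'k8s/', 'terraform/', '.github/']):
--             change_types['infrastructure'] += 1
--         elif file_path.endswith(('.md', '.txt', '.rst')):
--             change_types['documentation'] += 1
--         elif file_path.startswith('tests/') or file_path.startswith('test_'):
--             change_types['tests'] += 1
--         else:
--             change_types['other'] += 1
--
--     return change_types
-- ===== SOURCE B (Python) =====
-- from typing import Dict, List
--
-- _RULES = [
--     (lambda p: p.startswith('backend/') or p.endswith('.py'), 'backend'),
--     (lambda p: p.startswith('frontend/') or p.endswith(('.tsx', '.ts', '.jsx', '.js', '.css', '.html')), 'frontend'),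
--     (lambda p: any(p.startswith(prefix) for prefix in ['docker-compose', 'Dockerfile', 'k8s/', 'terraform/', '.github/']), 'infrastructure'),
--     (lambda p: p.endswith(('.md', '.txt', '.rst')), 'documentation'),
--     (lambda p: p.startswith('tests/') or p.startswith('test_'), 'tests'),
-- ]
--
-- def analyze_change_types(files: List[str]) -> Dict[str, int]:
--     """Analyze what types of changes were made."""
--     # Staged subtractive passes: each rule counts its matches among the files
--     # left over from the previous stages, then removes them from the pool.
--     rest = [f for f in files if f]
--     result = {}
--     for pred, cat in _RULES:
--         result[cat] = len([f for f in rest if pred(f)])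
--         rest = [f for f in rest if not pred(f)]
--     result['other'] = len(rest)
--     return result
-- ===== Notes on version B (the rewrite author's own statement) =====
-- stated objective: alternative
-- what changed: Replaces A's single pass that classifies each file through a six-way if-elif chain and mutates a counter dict by staged subtractive passes: each rule in turn counts its matches among the remaining pool and removes them, the final leftover pool length being 'other'.
import Mathlib
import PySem

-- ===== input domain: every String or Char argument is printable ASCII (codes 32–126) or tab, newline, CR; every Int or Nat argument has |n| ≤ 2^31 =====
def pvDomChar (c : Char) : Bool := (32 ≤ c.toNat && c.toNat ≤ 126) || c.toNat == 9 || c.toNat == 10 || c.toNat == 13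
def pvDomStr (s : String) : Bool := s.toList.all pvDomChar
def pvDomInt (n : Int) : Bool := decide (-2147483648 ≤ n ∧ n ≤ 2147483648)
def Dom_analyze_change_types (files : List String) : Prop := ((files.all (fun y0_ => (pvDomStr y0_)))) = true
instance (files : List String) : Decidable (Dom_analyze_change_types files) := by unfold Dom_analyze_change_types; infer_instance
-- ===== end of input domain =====

-- B replaces A's single classifying pass over the files by staged subtractive passes over
-- an ordered rule table: each rule counts its matches in the remaining pool and removes
-- them, the leftover pool being 'other' (objective: alternative; same asymptotic cost).


-- ===== PORT A =====
def pvInitA : PySem.Dict String Int :=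
  PySem.Dict.ofList [("backend", 0), ("frontend", 0), ("infrastructure", 0),
                     ("documentation", 0), ("tests", 0), ("other", 0)]

def pvStepA (d : PySem.Dict String Int) (fp : String) : PySem.Dict String Int :=
  if fp == "" then d
  else if PySem.Str.startswith fp "backend/" || PySem.Str.endswith fp ".py" then
    d.modify "backend" 0 (· + 1)
  else if PySem.Str.startswith fp "frontend/" || PySem.Str.endswith fp ".tsx" ||
          PySem.Str.endswith fp ".ts" || PySem.Str.endswith fp ".jsx" ||
          PySem.Str.endswith fp ".js" || PySem.Str.endswith fp ".css" ||
          PySem.Str.endswith fp ".html" then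
    d.modify "frontend" 0 (· + 1)
  else if ["docker-compose", "Dockerfile", "k8s/", "terraform/", ".github/"].any
            (fun p => PySem.Str.startswith fp p) then
    d.modify "infrastructure" 0 (· + 1)
  else if PySem.Str.endswith fp ".md" || PySem.Str.endswith fp ".txt" ||
          PySem.Str.endswith fp ".rst" then
    d.modify "documentation" 0 (· + 1)
  else if PySem.Str.startswith fp "tests/" || PySem.Str.startswith fp "test_" then
    d.modify "tests" 0 (· + 1)
  else
    d.modify "other" 0 (· + 1)

def analyze_change_types (files : List String) : List (String × Int) :=
  (files.foldl pvStepA pvInitA).items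

-- ===== PORT B =====
-- the five rule predicates (B's lambdas, named)
def pvP1 (p : String) : Bool := PySem.Str.startswith p "backend/" || PySem.Str.endswith p ".py"
def pvP2 (p : String) : Bool :=
  PySem.Str.startswith p "frontend/" || PySem.Str.endswith p ".tsx" ||
  PySem.Str.endswith p ".ts" || PySem.Str.endswith p ".jsx" ||
  PySem.Str.endswith p ".js" || PySem.Str.endswith p ".css" || PySem.Str.endswith p ".html"
def pvP3 (p : String) : Bool :=
  ["docker-compose", "Dockerfile", "k8s/", "terraform/", ".github/"].any
    (fun pre => PySem.Str.startswith p pre)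
def pvP4 (p : String) : Bool :=
  PySem.Str.endswith p ".md" || PySem.Str.endswith p ".txt" || PySem.Str.endswith p ".rst"
def pvP5 (p : String) : Bool := PySem.Str.startswith p "tests/" || PySem.Str.startswith p "test_"

def pvRules : List ((String → Bool) × String) :=
  [(pvP1, "backend"), (pvP2, "frontend"), (pvP3, "infrastructure"),
   (pvP4, "documentation"), (pvP5, "tests")]

-- staged subtractive passes: one pass per rule over the remaining pool
def pvStage : List ((String → Bool) × String) → List String → List (String × Int)
  | [], rest => [("other", (rest.length : Int))]
  | r :: rs, rest =>
      (r.2, ((rest.filter r.1).length : Int)) :: pvStage rs (rest.filter (fun f => !(r.1 f)))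

def analyze_change_types_alt (files : List String) : List (String × Int) :=
  pvStage pvRules (files.filter (fun f => !(f == "")))

-- ===== PRECONDITION & SPEC =====
def Spec_analyze_change_types (files : List String) (out : List (String × Int)) : Prop := out = analyze_change_types_alt files
instance (files : List String) (out : List (String × Int)) : Decidable (Spec_analyze_change_types files out) := by unfold Spec_analyze_change_types; infer_instance

-- ===== CLAIM (what is proved, stated in full; the proofs are below) =====
def Claim_equal_analyze_change_types : Prop := ∀ (files : List String), Dom_analyze_change_types files → Spec_analyze_change_types files (analyze_change_types files)

-- ===== LEMMAS AND PROOFS =====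

-- Proof-only helpers: the first-match category of a path, and per-category counts.
def pvCategorize (f : String) : String :=
  if pvP1 f then "backend" else if pvP2 f then "frontend" else if pvP3 f then "infrastructure"
  else if pvP4 f then "documentation" else if pvP5 f then "tests" else "other"

def pvCnt (l : List String) (c : String) : Int :=
  ((l.filter (fun f => !(f == ""))).countP (fun f => pvCategorize f == c) : Int)

-- A's loop step rewritten through the categorizer.
def pvStep' (d : PySem.Dict String Int) (f : String) : PySem.Dict String Int :=
  if f == "" then d else d.modify (pvCategorize f) 0 (· + 1)

theorem pvStepA_eq (d : PySem.Dict String Int) (fp : String) : pvStepA d fp = pvStep' d fp := by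
  unfold pvStepA pvStep' pvCategorize pvP1 pvP2 pvP3 pvP4 pvP5
  split_ifs <;> simp_all

theorem pvCat_mem (fp : String) :
    pvCategorize fp ∈ ["backend", "frontend", "infrastructure", "documentation", "tests", "other"] := by
  unfold pvCategorize
  split_ifs <;> simp

theorem pvFold (l : List String) (b fr i doc t o : Int) :
    l.foldl pvStep' (PySem.Dict.mk [("backend", b), ("frontend", fr), ("infrastructure", i),
                                    ("documentation", doc), ("tests", t), ("other", o)])
      = PySem.Dict.mk [("backend", b + pvCnt l "backend"), ("frontend", fr + pvCnt l "frontend"),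
                       ("infrastructure", i + pvCnt l "infrastructure"),
                       ("documentation", doc + pvCnt l "documentation"),
                       ("tests", t + pvCnt l "tests"), ("other", o + pvCnt l "other")] := by
  induction l generalizing b fr i doc t o with
  | nil => simp [pvCnt]
  | cons f l ih =>
      simp only [List.foldl_cons]
      by_cases h0 : (f == "") = true
      · rw [show pvStep' _ f = _ from if_pos h0, ih]
        simp [pvCnt, h0]
      · have h0' : (f == "") = false := by simpa using h0
        have hcnt : ∀ c, pvCnt (f :: l) c = (if pvCategorize f == c then 1 else 0) + pvCnt l c := by
          intro c
          simp only [pvCnt, List.filter_cons, h0', Bool.not_false, if_pos, List.countP_cons]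
          split <;> push_cast <;> ring
        rw [show pvStep' _ f = _ from if_neg h0,
            hcnt "backend", hcnt "frontend", hcnt "infrastructure", hcnt "documentation",
            hcnt "tests", hcnt "other"]
        have hm := pvCat_mem f
        revert hm
        generalize pvCategorize f = c
        intro hm
        fin_cases hm <;>
          simp [PySem.Dict.modify, PySem.Dict.getD, PySem.Dict.get?, PySem.Dict.insert,
                PySem.Dict.contains, ih, PySem.Dict.mk.injEq, List.cons.injEq, Prod.mk.injEq] <;>
          omega

-- each staged pass counts exactly one category of the categorizer
theorem pvStage_eq (rest : List String) :
    pvStage pvRules rest =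
      [("backend", (rest.countP (fun f => pvCategorize f == "backend") : Int)),
       ("frontend", (rest.countP (fun f => pvCategorize f == "frontend") : Int)),
       ("infrastructure", (rest.countP (fun f => pvCategorize f == "infrastructure") : Int)),
       ("documentation", (rest.countP (fun f => pvCategorize f == "documentation") : Int)),
       ("tests", (rest.countP (fun f => pvCategorize f == "tests") : Int)),
       ("other", (rest.countP (fun f => pvCategorize f == "other") : Int))] := by
  simp only [pvRules, pvStage, List.cons.injEq, Prod.mk.injEq, and_true, true_and]
  refine ⟨?_, ?_, ?_, ?_, ?_, ?_⟩ <;>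
  · rw [← List.countP_eq_length_filter]
    repeat rw [List.countP_filter]
    congr 1
    apply List.countP_congr
    intro f _
    simp only [pvCategorize]
    by_cases h1 : pvP1 f <;> by_cases h2 : pvP2 f <;> by_cases h3 : pvP3 f <;>
      by_cases h4 : pvP4 f <;> by_cases h5 : pvP5 f <;> simp_all

-- ===== VERDICT (by name: the statement is the Claim_ definition above) =====
theorem analyze_change_types_spec : Claim_equal_analyze_change_types := by
  intro files _
  show analyze_change_types files = analyze_change_types_alt files
  have hstep : pvStepA = pvStep' := funext fun d => funext fun f => pvStepA_eq d f
  have hinit : pvInitA = PySem.Dict.mk [("backend", 0), ("frontend", 0), ("infrastructure", 0),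
                                        ("documentation", 0), ("tests", 0), ("other", 0)] := rfl
  unfold analyze_change_types analyze_change_types_alt
  rw [hstep, hinit, pvFold, pvStage_eq]
  simp [pvCnt]
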